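-- pv_equiv track=rewrite | github.com/talwai/codeeval_solutions | levenshtein.py | is_sibling
-- ===== SOURCE A (Python) =====
-- def is_sibling(a,b):
--     both = [a,b]
--     len_diff = abs(len(a)-len(b))
--
--     # Length difference greater than 1 => Not friends
--     if len_diff > 1:
--         return False
--     elif len_diff == 1:
--         #Every character in shorter must appear in longer, in SAME ORDER
--         both = sorted(both, key=lambda x: len(x))
--         shorter, longer = both[0], both[1]
--
--         i = 0
--         offset = 0
--
--         while i < len(shorter):
--             if shorter[i] != longer[i+offset]:
--                 offset += 1
--             else:
--                 i += 1
--
--             #Indicates word distance > 1, not friends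
--             if offset > 1:
--                 return False
--     elif len_diff == 0:
--         #Minimum 1 character difference between a and b
--         dist = 0
--         for i in range(0, len(a)):
--             if a[i] != b[i]:
--                 dist += 1
--         if dist > 1:
--             return False
--
--     return True
-- ===== SOURCE B (Python) =====
-- def _one_delete(l, s):
--     # True iff deleting exactly one char of l yields s (assumes len(l) == len(s)+1)
--     for i in range(len(s)):
--         if s[i] != l[i]:
--             return s[i:] == l[i+1:]
--     return True
--
-- def is_sibling(a, b):
--     if len(a) == len(b):
--         return sum(1 for x, y in zip(a, b) if x != y) <= 1
--     if abs(len(a) - len(b)) != 1: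
--         return False
--     return _one_delete(b, a) if len(a) < len(b) else _one_delete(a, b)
-- ===== Notes on version B (the rewrite author's own statement) =====
-- stated objective: idiomatic
-- what changed: Replaced A's stable sort of the two strings plus an index/offset walking loop and a range-indexed mismatch-counting loop by a direct decomposition: for equal lengths count mismatches over zip(a,b); for a length difference of one, find the first mismatch index and compare the remaining suffix of the shorter with the longer shifted by one.
import Mathlib
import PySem

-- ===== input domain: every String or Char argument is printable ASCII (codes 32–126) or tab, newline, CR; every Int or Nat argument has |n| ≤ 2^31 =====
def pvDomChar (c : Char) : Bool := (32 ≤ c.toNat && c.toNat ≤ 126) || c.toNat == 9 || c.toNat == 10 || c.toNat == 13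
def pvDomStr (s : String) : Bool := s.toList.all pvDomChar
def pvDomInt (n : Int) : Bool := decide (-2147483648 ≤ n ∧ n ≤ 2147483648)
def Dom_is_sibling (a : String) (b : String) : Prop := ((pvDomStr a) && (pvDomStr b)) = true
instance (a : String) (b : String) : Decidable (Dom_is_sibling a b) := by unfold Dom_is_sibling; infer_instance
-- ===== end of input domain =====

-- B replaces A's sort + offset-walking while loop and index-counting loop with a zip
-- mismatch count / first-mismatch-then-suffix-comparison decomposition (idiomatic, same cost).

-- ===== PORT A =====
-- A's while loop over (i, offset); i and offset stay ≥ 0 in Python, so they are Nat here.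
-- shorter[i] / longer[i+offset] are PySem.List.pyGet? (none = IndexError, never hit inside the loop guard).
def aLoop (shorter longer : List Char) (i offset : Nat) : Bool :=
  if _h : i < shorter.length then
    if PySem.List.pyGet? shorter (i : Int) ≠ PySem.List.pyGet? longer ((i : Int) + (offset : Int)) then
      if _h2 : offset + 1 > 1 then false
      else aLoop shorter longer i (offset + 1)
    else
      if offset > 1 then false
      else aLoop shorter longer (i + 1) offset
  else true
termination_by (shorter.length - i, 2 - offset)
decreasing_by
  · right; omega
  · left; omega

def is_sibling (a : String) (b : String) : Bool :=
  let len_diff : Int := |(a.length : Int) - (b.length : Int)|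
  if len_diff > 1 then false
  else if len_diff = 1 then
    -- both = sorted([a,b], key=len); both[0], both[1] are always in range here
    let both := PySem.List.sorted [a, b] (fun x => (x.length : Int)) false
    let shorter := PySem.List.pyGetD both 0 ""
    let longer := PySem.List.pyGetD both 1 ""
    aLoop shorter.toList longer.toList 0 0
  else if len_diff = 0 then
    let dist : Int := (PySem.List.pyRange 0 (a.length : Int) 1).foldl
      (fun d i => if PySem.List.pyGet? a.toList i ≠ PySem.List.pyGet? b.toList i then d + 1 else d) 0
    if dist > 1 then false else true
  else true

-- ===== PORT B =====
-- _one_delete(l, s): scan for the first mismatch; on finding it compare s[i:] with l[i+1:]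
-- (the slices have nonnegative bounds, so they are List.drop).
def oneDeleteLoop (l s : List Char) (i : Nat) : Bool :=
  if _h : i < s.length then
    if PySem.List.pyGet? s (i : Int) ≠ PySem.List.pyGet? l (i : Int) then
      decide (s.drop i = l.drop (i + 1))
    else oneDeleteLoop l s (i + 1)
  else true
termination_by s.length - i

def is_sibling_alt (a : String) (b : String) : Bool :=
  if a.length = b.length then
    decide ((a.toList.zip b.toList).countP (fun p => p.1 != p.2) ≤ 1)
  else if |(a.length : Int) - (b.length : Int)| ≠ 1 then false
  else if a.length < b.length then oneDeleteLoop b.toList a.toList 0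
  else oneDeleteLoop a.toList b.toList 0

-- ===== PRECONDITION & SPEC =====
def Spec_is_sibling (a : String) (b : String) (out : Bool) : Prop := out = is_sibling_alt a b
instance (a : String) (b : String) (out : Bool) : Decidable (Spec_is_sibling a b out) := by unfold Spec_is_sibling; infer_instance

-- ===== CLAIM (what is proved, stated in full; the proofs are below) =====
def Claim_equal_is_sibling : Prop := ∀ (a : String) (b : String), Dom_is_sibling a b → Spec_is_sibling a b (is_sibling a b)

-- ===== LEMMAS AND PROOFS =====

-- After the first mismatch (offset = 1), A's loop checks s[j] = l[j+1] for all remaining j: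
-- it returns true exactly when s.drop i = l.drop (i+1).
theorem aLoop_one (s l : List Char) (hl : l.length = s.length + 1) :
    ∀ i, aLoop s l i 1 = decide (s.drop i = l.drop (i + 1)) := by
  have key : ∀ n i, s.length - i ≤ n → aLoop s l i 1 = decide (s.drop i = l.drop (i + 1)) := by
    intro n
    induction n with
    | zero =>
      intro i hi
      rw [aLoop, dif_neg (by omega)]
      rw [List.drop_eq_nil_of_le (by omega : s.length ≤ i),
        List.drop_eq_nil_of_le (by omega : l.length ≤ i + 1)]
      simp
    | succ n ih =>
      intro i hi
      by_cases h : i < s.length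
      · have hi1 : i + 1 < l.length := by omega
        rw [aLoop, dif_pos h]
        have e1 : PySem.List.pyGet? s (i : Int) = some s[i] := by
          rw [PySem.List.pyGet?_natCast]; exact List.getElem?_eq_getElem h
        have ec : ((i : Int) + ((1 : Nat) : Int)) = (((i + 1 : Nat)) : Int) := by push_cast; ring
        have e2 : PySem.List.pyGet? l ((i : Int) + ((1 : Nat) : Int)) = some l[i + 1] := by
          rw [ec, PySem.List.pyGet?_natCast]; exact List.getElem?_eq_getElem hi1
        rw [e1, e2]
        have hds : s.drop i = s[i] :: s.drop (i + 1) := List.drop_eq_getElem_cons h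
        have hdl : l.drop (i + 1) = l[i + 1] :: l.drop (i + 1 + 1) := List.drop_eq_getElem_cons hi1
        by_cases hne : s[i] = l[i + 1]
        · rw [if_neg (by simp [hne]), if_neg (show ¬(1 > 1) by omega)]
          rw [ih (i + 1) (by omega), decide_eq_decide]
          constructor
          · intro ht; rw [hds, hdl, hne, ht]
          · intro ht; rw [hds, hdl] at ht; exact (List.cons_eq_cons.mp ht).2
        · rw [if_pos (by simp [hne]), dif_pos (show 1 + 1 > 1 by omega)]
          symm
          rw [decide_eq_false_iff_not]
          intro hc
          rw [hds, hdl] at hc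
          injection hc with h1 _
          exact hne h1
      · rw [aLoop, dif_neg h]
        rw [List.drop_eq_nil_of_le (by omega : s.length ≤ i),
          List.drop_eq_nil_of_le (by omega : l.length ≤ i + 1)]
        simp
  intro i; exact key (s.length - i) i le_rfl

-- Before any mismatch (offset = 0), A's loop advances down matching prefixes exactly
-- like B's first-mismatch scan, and on the first mismatch both reduce to the same suffix test.
theorem aLoop_zero (s l : List Char) (hl : l.length = s.length + 1) :
    ∀ i, aLoop s l i 0 = oneDeleteLoop l s i := by
  have key : ∀ n i, s.length - i ≤ n → aLoop s l i 0 = oneDeleteLoop l s i := by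
    intro n
    induction n with
    | zero =>
      intro i hi
      rw [aLoop, dif_neg (by omega), oneDeleteLoop, dif_neg (by omega)]
    | succ n ih =>
      intro i hi
      by_cases h : i < s.length
      · rw [aLoop, dif_pos h, oneDeleteLoop, dif_pos h]
        have ec : ((i : Int) + ((0 : Nat) : Int)) = (i : Int) := by push_cast; ring
        rw [ec]
        by_cases hne : PySem.List.pyGet? s (i : Int) = PySem.List.pyGet? l (i : Int)
        · have hne' : ¬(PySem.List.pyGet? s (i : Int) ≠ PySem.List.pyGet? l (i : Int)) := by
            simp [hne]
          rw [if_neg hne', if_neg hne', if_neg (show ¬((0 : Nat) > 1) by omega)]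
          have hrec : s.length - (i + 1) ≤ n := by omega
          exact ih (i + 1) hrec
        · rw [if_pos hne, if_pos hne, dif_neg (show ¬(0 + 1 > 1) by omega)]
          exact aLoop_one s l hl i
      · rw [aLoop, dif_neg h, oneDeleteLoop, dif_neg h]
  intro i; exact key (s.length - i) i le_rfl

-- A's equal-length counting loop over range(len(a)) counts exactly the mismatching
-- positions of zip(a, b).
theorem dist_eq (xs ys : List Char) (h : xs.length = ys.length) :
    ((PySem.List.pyRange 0 (xs.length : Int) 1).foldl
      (fun d i => if PySem.List.pyGet? xs i ≠ PySem.List.pyGet? ys i then d + 1 else d) (0 : Int))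
    = ((xs.zip ys).countP (fun p => p.1 != p.2) : Int) := by
  have hmap : (PySem.List.pyRange 0 (xs.length : Int) 1).map
      (fun j => (PySem.List.pyGetD xs j 'a', PySem.List.pyGetD ys j 'a')) = xs.zip ys := by
    apply List.ext_getElem
    · simp [PySem.List.length_pyRange_one, h]
    · intro k h1 h2
      have hk : k < xs.length := by
        simpa [PySem.List.length_pyRange_one] using h1
      have hk' : k < ys.length := by omega
      simp [PySem.List.getElem_pyRange_one, PySem.List.pyGetD_natCast,
        List.getD_eq_getElem?_getD, List.getElem?_eq_getElem hk, List.getElem?_eq_getElem hk',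
        List.getElem_zip]
  have hcong : (PySem.List.pyRange 0 (xs.length : Int) 1).foldl
      (fun d i => if PySem.List.pyGet? xs i ≠ PySem.List.pyGet? ys i then d + 1 else d) (0 : Int)
      = (PySem.List.pyRange 0 (xs.length : Int) 1).foldl
      (fun d i => if (PySem.List.pyGetD xs i 'a', PySem.List.pyGetD ys i 'a').1
                    ≠ (PySem.List.pyGetD xs i 'a', PySem.List.pyGetD ys i 'a').2
                  then d + 1 else d) (0 : Int) := by
    apply PySem.List.foldl_congr_mem
    intro acc j hj
    have hj' : 0 ≤ j ∧ j < (xs.length : Int) := (PySem.List.mem_pyRange_one).1 hj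
    have hx : PySem.List.pyGet? xs j = some (PySem.List.pyGetD xs j 'a') := by
      rw [PySem.List.pyGet?_eq_some_getElem xs hj'.1 (by omega),
        PySem.List.pyGetD_eq_getElem xs 'a' hj'.1 (by omega)]
    have hy : PySem.List.pyGet? ys j = some (PySem.List.pyGetD ys j 'a') := by
      rw [PySem.List.pyGet?_eq_some_getElem ys hj'.1 (by omega),
        PySem.List.pyGetD_eq_getElem ys 'a' hj'.1 (by omega)]
    rw [hx, hy]
    by_cases hs : PySem.List.pyGetD xs j 'a' = PySem.List.pyGetD ys j 'a' <;> simp [hs]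
  rw [hcong, ← List.foldl_map
      (f := fun j => (PySem.List.pyGetD xs j 'a', PySem.List.pyGetD ys j 'a'))
      (g := fun d p => if p.1 ≠ p.2 then d + 1 else (d : Int)), hmap]
  rw [PySem.List.foldl_ite_add_one]
  have hcnt : ((xs.zip ys).countP fun p => decide (p.1 ≠ p.2))
      = (xs.zip ys).countP fun p => p.1 != p.2 := by
    apply List.countP_congr
    intro p _
    by_cases hp : p.1 = p.2 <;> simp [hp]
  rw [hcnt, zero_add]

-- ===== VERDICT (by name: the statement is the Claim_ definition above) =====
theorem is_sibling_spec : Claim_equal_is_sibling := by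
  intro a b _
  unfold Spec_is_sibling is_sibling is_sibling_alt
  dsimp only
  have hla : a.toList.length = a.length := by simp
  have hlb : b.toList.length = b.length := by simp
  rcases abs_cases ((a.length : Int) - (b.length : Int)) with ⟨he, hsg⟩ | ⟨he, hsg⟩ <;>
    rw [he] <;>
    rcases Nat.lt_trichotomy a.length b.length with hlt | heq | hgt
  · exfalso; omega
  · -- equal lengths: A's counting loop vs B's zip count
    rw [if_neg (by omega), if_neg (by omega), if_pos (by omega), if_pos heq]
    rw [show ((a.length : Int)) = ((a.toList.length : Int)) by rw [hla],
      dist_eq a.toList b.toList (by omega)]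
    by_cases hc : (a.toList.zip b.toList).countP (fun p => p.1 != p.2) ≤ 1
    · rw [if_neg (by omega), decide_eq_true hc]
    · rw [if_pos (by omega)]
      symm
      rw [decide_eq_false_iff_not]
      omega
  · -- a is longer
    by_cases hd : a.length = b.length + 1
    · rw [if_neg (by omega), if_pos (by omega), if_neg (by omega), if_neg (by omega),
        if_neg (by omega)]
      have hsort : PySem.List.sorted [a, b] (fun x => (x.length : Int)) false = [b, a] := by
        apply PySem.List.sorted_eq_of_perm_of_pairwise_lt
        · exact List.Perm.swap a b []
        · simp [List.pairwise_cons]; omega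
      rw [hsort]
      simp only [pysem]
      exact aLoop_zero b.toList a.toList (by omega) 0
    · rw [if_pos (by omega), if_neg (by omega), if_pos (by omega)]
  · -- b is longer
    by_cases hd : b.length = a.length + 1
    · rw [if_neg (by omega), if_pos (by omega), if_neg (by omega), if_neg (by omega),
        if_pos hlt]
      have hsort : PySem.List.sorted [a, b] (fun x => (x.length : Int)) false = [a, b] := by
        apply PySem.List.sorted_eq_self_of_pairwise
        simp [List.pairwise_cons]; omega
      rw [hsort]
      simp only [pysem]
      exact aLoop_zero a.toList b.toList (by omega) 0
    · rw [if_pos (by omega), if_neg (by omega), if_pos (by omega)]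
  · exfalso; omega
  · exfalso; omega
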